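-- pv_equiv track=rewrite | github.com/DennisMaes6/thesis | subpopulation_script.py | get_nb_times_rest_less_than
-- ===== SOURCE A (Python) =====
-- def get_nb_times_rest_less_than(assignments, min_bal=12):
--     first_shift = True
--     counter = 0
--     total = 0
--     for ass in assignments:
--         if ass == "FREE":
--             if not first_shift:
--                 counter += 1
--         else:
--             if not first_shift:
--                 if counter < min_bal and counter > 0:
--                     total += 1
--             else:
--                 first_shift = False
--
--             counter = 0
--     return total
-- ===== SOURCE B (Python) =====
-- def get_nb_times_rest_less_than(assignments, min_bal=12):
--     shifts = [i for i, ass in enumerate(assignments) if ass != "FREE"]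
--     return sum(1 for i, j in zip(shifts, shifts[1:]) if 0 < j - i - 1 < min_bal)
-- ===== Notes on version B (the rewrite author's own statement) =====
-- stated objective: simpler
-- what changed: Replaced the flag/counter state machine by an index table of non-FREE positions followed by a pairwise-difference pass counting gaps with 0 < j - i - 1 < min_bal.
import Mathlib
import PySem

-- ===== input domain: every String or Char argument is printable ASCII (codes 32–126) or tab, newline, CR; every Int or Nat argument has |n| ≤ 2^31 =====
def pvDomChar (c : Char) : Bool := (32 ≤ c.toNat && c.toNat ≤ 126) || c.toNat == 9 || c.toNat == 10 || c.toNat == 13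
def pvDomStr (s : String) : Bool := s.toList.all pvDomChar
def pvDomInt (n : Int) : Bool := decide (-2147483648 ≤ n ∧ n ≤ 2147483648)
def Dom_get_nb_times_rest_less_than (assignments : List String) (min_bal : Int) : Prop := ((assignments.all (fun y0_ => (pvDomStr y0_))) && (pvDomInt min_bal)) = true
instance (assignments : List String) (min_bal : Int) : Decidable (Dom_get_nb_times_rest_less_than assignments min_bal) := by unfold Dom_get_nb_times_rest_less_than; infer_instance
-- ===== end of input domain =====

-- B replaces A's flag/counter state machine by an index table of non-FREE positions
-- plus a pairwise-difference pass (objective: simpler); same O(n) cost, return value proved equal.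

-- ===== PORT A =====
-- one step of A's for-loop: state = (first_shift, counter, total)
def pvStepA (min_bal : Int) (st : Bool × Int × Int) (ass : String) : Bool × Int × Int :=
  if ass = "FREE" then
    if ¬ st.1 then (st.1, st.2.1 + 1, st.2.2) else st
  else
    if ¬ st.1 then (st.1, 0, if st.2.1 < min_bal ∧ st.2.1 > 0 then st.2.2 + 1 else st.2.2)
    else (false, 0, st.2.2)

def get_nb_times_rest_less_than (assignments : List String) (min_bal : Int) : Int :=
  (assignments.foldl (pvStepA min_bal) (true, 0, 0)).2.2

-- ===== PORT B =====
def get_nb_times_rest_less_than_alt (assignments : List String) (min_bal : Int) : Int :=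
  let shifts : List Int := ((PySem.List.enumerate assignments).filter (fun p => p.2 ≠ "FREE")).map (fun p => p.1)
  (shifts.zip shifts.tail).foldl
    (fun acc p => if 0 < p.2 - p.1 - 1 ∧ p.2 - p.1 - 1 < min_bal then acc + 1 else acc) 0

-- ===== PRECONDITION & SPEC =====
def Spec_get_nb_times_rest_less_than (assignments : List String) (min_bal : Int) (out : Int) : Prop := out = get_nb_times_rest_less_than_alt assignments min_bal
instance (assignments : List String) (min_bal : Int) (out : Int) : Decidable (Spec_get_nb_times_rest_less_than assignments min_bal out) := by unfold Spec_get_nb_times_rest_less_than; infer_instance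

-- ===== CLAIM (what is proved, stated in full; the proofs are below) =====
def Claim_equal_get_nb_times_rest_less_than : Prop := ∀ (assignments : List String) (min_bal : Int), Dom_get_nb_times_rest_less_than assignments min_bal → Spec_get_nb_times_rest_less_than assignments min_bal (get_nb_times_rest_less_than assignments min_bal)

-- ===== LEMMAS AND PROOFS =====

-- the index table: positions (base n) of non-"FREE" entries
def pvIdx (n : Int) : List String → List Int
  | [] => []
  | s :: l => if s ≠ "FREE" then n :: pvIdx (n + 1) l else pvIdx (n + 1) l

-- pairwise-gap count over an index list
def pvPc (mb : Int) : List Int → Int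
  | a :: b :: r => (if 0 < b - a - 1 ∧ b - a - 1 < mb then 1 else 0) + pvPc mb (b :: r)
  | _ => 0

-- gap count after the first shift, with c FREEs accumulated since the last shift
def pvGa (mb : Int) : List String → Int → Int
  | [], _ => 0
  | s :: l, c =>
    if s = "FREE" then pvGa mb l (c + 1)
    else (if 0 < c ∧ c < mb then 1 else 0) + pvGa mb l 0

lemma pvIdx_filter_map (l : List String) (n : Int) :
    ((PySem.List.enumerate l n).filter (fun p => p.2 ≠ "FREE")).map (fun p => p.1) = pvIdx n l := by
  induction l generalizing n with
  | nil => simp [PySem.List.enumerate_nil]; rfl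
  | cons s l ih =>
    rw [PySem.List.enumerate_cons, List.filter_cons]
    by_cases h : s = "FREE"
    · rw [if_neg (by simp [h])]
      rw [ih]
      simp [pvIdx, h]
    · rw [if_pos (by simp [h])]
      simp only [List.map_cons]
      rw [ih]
      simp [pvIdx, h]

lemma pvPc_foldl (mb : Int) (l : List Int) (acc : Int) :
    (l.zip l.tail).foldl
      (fun acc p => if 0 < p.2 - p.1 - 1 ∧ p.2 - p.1 - 1 < mb then acc + 1 else acc) acc
    = acc + pvPc mb l := by
  induction l generalizing acc with
  | nil => rw [show pvPc mb [] = 0 from rfl]; simp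
  | cons a l ih =>
    cases l with
    | nil =>
      rw [show pvPc mb [a] = 0 from rfl]
      simp
    | cons b r =>
      simp only [List.tail_cons, List.zip_cons_cons, List.foldl_cons]
      rw [show ((b :: r).zip r) = ((b :: r).zip (b :: r).tail) from rfl, ih]
      rw [show pvPc mb (a :: b :: r)
            = (if 0 < b - a - 1 ∧ b - a - 1 < mb then 1 else 0) + pvPc mb (b :: r) from rfl]
      split_ifs with h <;> ring

lemma pvPc_cons_idx (mb : Int) (l : List String) (n c : Int) :
    pvPc mb (n :: pvIdx (n + 1 + c) l) = pvGa mb l c := by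
  induction l generalizing n c with
  | nil => rfl
  | cons s l ih =>
    by_cases h : s = "FREE"
    · rw [show pvIdx (n + 1 + c) (s :: l) = pvIdx (n + 1 + (c + 1)) l by
        simp [pvIdx, h]; ring_nf]
      rw [ih n (c + 1)]
      simp [pvGa, h]
    · rw [show pvIdx (n + 1 + c) (s :: l) = (n + 1 + c) :: pvIdx ((n + 1 + c) + 1) l by
        simp [pvIdx, h]]
      rw [show pvPc mb (n :: (n + 1 + c) :: pvIdx ((n + 1 + c) + 1) l)
            = (if 0 < (n + 1 + c) - n - 1 ∧ (n + 1 + c) - n - 1 < mb then 1 else 0)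
              + pvPc mb ((n + 1 + c) :: pvIdx ((n + 1 + c) + 1) l) from rfl]
      have hrec : pvPc mb ((n + 1 + c) :: pvIdx ((n + 1 + c) + 1) l) = pvGa mb l 0 := by
        have := ih (n + 1 + c) 0
        simpa using this
      rw [hrec, show (n + 1 + c) - n - 1 = c from by ring]
      rw [show pvGa mb (s :: l) c = (if 0 < c ∧ c < mb then 1 else 0) + pvGa mb l 0 by
        simp [pvGa, h]]

lemma pvFold_after (mb : Int) (l : List String) (c t : Int) :
    (l.foldl (pvStepA mb) (false, c, t)).2.2 = t + pvGa mb l c := by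
  induction l generalizing c t with
  | nil => rw [show pvGa mb [] c = 0 from rfl]; simp
  | cons s l ih =>
    simp only [List.foldl_cons]
    by_cases h : s = "FREE"
    · rw [show pvStepA mb (false, c, t) s = (false, c + 1, t) by simp [pvStepA, h]]
      rw [ih]
      rw [show pvGa mb (s :: l) c = pvGa mb l (c + 1) by simp [pvGa, h]]
    · rw [show pvStepA mb (false, c, t) s
            = (false, 0, if c < mb ∧ c > 0 then t + 1 else t) by simp [pvStepA, h]]
      rw [ih]
      rw [show pvGa mb (s :: l) c = (if 0 < c ∧ c < mb then 1 else 0) + pvGa mb l 0 by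
        simp [pvGa, h]]
      by_cases h1 : c < mb ∧ c > 0
      · rw [if_pos h1, if_pos ⟨h1.2, h1.1⟩]; ring
      · rw [if_neg h1, if_neg (fun hh => h1 ⟨hh.2, hh.1⟩)]; ring

lemma pvFold_first (mb : Int) (l : List String) (n : Int) :
    (l.foldl (pvStepA mb) (true, 0, 0)).2.2 = pvPc mb (pvIdx n l) := by
  induction l generalizing n with
  | nil => rfl
  | cons s l ih =>
    simp only [List.foldl_cons]
    by_cases h : s = "FREE"
    · rw [show pvStepA mb (true, 0, 0) s = (true, 0, 0) by simp [pvStepA, h]]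
      rw [ih (n + 1)]
      rw [show pvIdx n (s :: l) = pvIdx (n + 1) l by simp [pvIdx, h]]
    · rw [show pvStepA mb (true, 0, 0) s = (false, 0, 0) by simp [pvStepA, h]]
      rw [pvFold_after]
      rw [show pvIdx n (s :: l) = n :: pvIdx (n + 1) l by simp [pvIdx, h]]
      have hpc := pvPc_cons_idx mb l n 0
      simp only [add_zero] at hpc
      rw [hpc]
      ring

-- ===== VERDICT (by name: the statement is the Claim_ definition above) =====
theorem get_nb_times_rest_less_than_spec : Claim_equal_get_nb_times_rest_less_than := by
  intro assignments min_bal _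
  unfold Spec_get_nb_times_rest_less_than get_nb_times_rest_less_than get_nb_times_rest_less_than_alt
  rw [pvIdx_filter_map, pvPc_foldl, pvFold_first min_bal assignments 0, zero_add]
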